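-- pv_equiv track=rewrite | github.com/edov97/water_dimer_analysis | utils/geom_utils.py | format_psi4_geom
-- ===== SOURCE A (Python) =====
-- def format_psi4_geom(coord_list:list, species_info:list, psi4_options_str:str=None):
--     """
--     Takes the list of monomer geometry, species info and extra psi4 options as inputs
--     Formats the Psi4 readable geometry string and returns in string format
--
--         coord_list: List[list]: Monomers with X, y,z coordinates
--                                 For dimers, len(coord_list) = 2
--         species_info:list[list]: Species info in psi4 format: like charge, multiplicity
--         psi4_options_str: Additional psi4 strings
--     """
--     geom_str_list = []
--     for i,monomer in enumerate(coord_list):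
--         if species_info[i] is not None:
--             geom_str_list.append('\n')
--             geom_str_list.extend(species_info[i])
--             geom_str_list.append('\n')
--         geom_str_list.extend(monomer)
--
--         if i+1< len(coord_list):
--             # geom_str_list.extend(['--'])
--             geom_str_list.extend(['\n', '--', '\n'])
--
--     geom_str_list.extend(psi4_options_str)
--     geom_str = ''.join(geom_str_list)
--
--     return geom_str
-- ===== SOURCE B (Python) =====
-- def format_psi4_geom(coord_list: list, species_info: list, psi4_options_str: str = None):
--     # Build the result back-to-front: start from the options tail and prepend
--     # each monomer block (with its optional species header and, for every
--     # monomer but the first, a leading '\n--\n' separator) walking indices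
--     # from the last monomer down to the first.
--     acc = ''.join(psi4_options_str)
--     for i in range(len(coord_list) - 1, -1, -1):
--         block = ''.join(coord_list[i])
--         if species_info[i] is not None:
--             block = '\n' + ''.join(species_info[i]) + '\n' + block
--         if i > 0:
--             block = '\n--\n' + block
--         acc = block + acc
--     return acc
-- ===== Notes on version B (the rewrite author's own statement) =====
-- stated objective: alternative
-- what changed: B assembles the string back-to-front: it starts from the joined options tail, walks the monomer indices in reverse, and prepends each block carrying its separator as a leading '\n--\n' on every monomer but the first, instead of A's forward loop that appends tokens and trailing separators to a flat list before one final join.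
import Mathlib
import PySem

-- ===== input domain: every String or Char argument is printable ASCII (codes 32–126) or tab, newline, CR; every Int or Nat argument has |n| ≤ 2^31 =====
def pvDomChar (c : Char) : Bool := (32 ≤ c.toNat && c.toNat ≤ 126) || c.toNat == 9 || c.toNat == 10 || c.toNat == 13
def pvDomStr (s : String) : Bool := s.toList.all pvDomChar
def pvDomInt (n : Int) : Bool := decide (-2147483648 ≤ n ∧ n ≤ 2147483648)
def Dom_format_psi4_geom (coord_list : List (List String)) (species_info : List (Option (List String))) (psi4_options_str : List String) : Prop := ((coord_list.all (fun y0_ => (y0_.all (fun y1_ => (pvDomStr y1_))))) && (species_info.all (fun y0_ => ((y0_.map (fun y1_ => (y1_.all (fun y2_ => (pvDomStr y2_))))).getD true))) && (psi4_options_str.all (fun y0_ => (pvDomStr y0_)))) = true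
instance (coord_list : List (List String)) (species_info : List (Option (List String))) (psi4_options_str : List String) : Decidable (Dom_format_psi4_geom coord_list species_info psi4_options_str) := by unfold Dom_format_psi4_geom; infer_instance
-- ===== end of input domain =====

-- B builds the string back-to-front: reverse index walk prepending blocks whose separator is a
-- leading '\n--\n', instead of A's forward token-list loop with trailing separators (objective: alternative).

-- ===== PORT A =====
-- ''.join(list) ported as a structural recursion (shared by both ports)
def strJoin : List String → String
  | [] => ""
  | a :: l => a ++ strJoin l

-- the body of A's `for i, monomer in enumerate(coord_list)` loop, carrying the index i;
-- the append-accumulator geom_str_list becomes the concatenation of the pieces in order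
def fpgA_go (si : List (Option (List String))) (n : Nat) (i : Nat) :
    List (List String) → List String
  | [] => []
  | m :: ms =>
    (match si.getD i none with
     | some s => ["\n"] ++ s ++ ["\n"]
     | none => []) ++ m ++
    (if i + 1 < n then ["\n", "--", "\n"] else []) ++
    fpgA_go si n (i + 1) ms

def format_psi4_geom (coord_list : List (List String)) (species_info : List (Option (List String))) (psi4_options_str : List String) : String :=
  strJoin (fpgA_go species_info coord_list.length 0 coord_list ++ psi4_options_str)

-- ===== PORT B =====
-- Python's `range(len(coord_list)-1, -1, -1)` is exactly (List.range n).reverse;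
-- coord_list[i] / species_info[i] are in range on every loop index under Pre_, so getD is exact.
def fpgB_step (cl : List (List String)) (si : List (Option (List String))) (acc : String) (i : Nat) : String :=
  let block := strJoin (cl.getD i [])
  let block :=
    match si.getD i none with
    | some s => "\n" ++ strJoin s ++ "\n" ++ block
    | none => block
  let block := if 0 < i then "\n--\n" ++ block else block
  block ++ acc

def format_psi4_geom_alt (coord_list : List (List String)) (species_info : List (Option (List String))) (psi4_options_str : List String) : String :=
  ((List.range coord_list.length).reverse).foldl (fpgB_step coord_list species_info) (strJoin psi4_options_str)

-- ===== PRECONDITION & SPEC =====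
-- A indexes species_info[i] for every monomer index i: it raises IndexError when
-- species_info is shorter than coord_list, so exactly those inputs are excluded (B raises there too).
def Pre_format_psi4_geom (coord_list : List (List String)) (species_info : List (Option (List String))) (psi4_options_str : List String) : Prop :=
  coord_list.length ≤ species_info.length
instance (coord_list : List (List String)) (species_info : List (Option (List String))) (psi4_options_str : List String) : Decidable (Pre_format_psi4_geom coord_list species_info psi4_options_str) := by unfold Pre_format_psi4_geom; infer_instance

def pvWitness_format_psi4_geom : List (List String) × List (Option (List String)) × List String :=
  ([["O 0 0 0\n", "H 1 0 0\n"], ["O 3 0 0\n"]], [some ["0 1"], none], ["units angstrom\n"])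

def Spec_format_psi4_geom (coord_list : List (List String)) (species_info : List (Option (List String))) (psi4_options_str : List String) (out : String) : Prop := out = format_psi4_geom_alt coord_list species_info psi4_options_str
instance (coord_list : List (List String)) (species_info : List (Option (List String))) (psi4_options_str : List String) (out : String) : Decidable (Spec_format_psi4_geom coord_list species_info psi4_options_str out) := by unfold Spec_format_psi4_geom; infer_instance

-- ===== CLAIM (what is proved, stated in full; the proofs are below) =====
def Claim_equal_format_psi4_geom : Prop := ∀ (coord_list : List (List String)) (species_info : List (Option (List String))) (psi4_options_str : List String), Dom_format_psi4_geom coord_list species_info psi4_options_str → Pre_format_psi4_geom coord_list species_info psi4_options_str → Spec_format_psi4_geom coord_list species_info psi4_options_str (format_psi4_geom coord_list species_info psi4_options_str)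

-- ===== LEMMAS AND PROOFS =====
theorem strJoin_append (l m : List String) : strJoin (l ++ m) = strJoin l ++ strJoin m := by
  induction l with
  | nil => simp [strJoin]
  | cons a t ih => simp [strJoin, ih, String.append_assoc]

-- the block B prepends at index i, as a plain concatenation
def gB (cl : List (List String)) (si : List (Option (List String))) (i : Nat) : String :=
  (if 0 < i then "\n--\n" else "") ++
  (match si.getD i none with
   | some s => "\n" ++ strJoin s ++ "\n"
   | none => "") ++
  strJoin (cl.getD i [])

theorem fpgB_step_eq (cl : List (List String)) (si : List (Option (List String))) (acc : String) (i : Nat) :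
    fpgB_step cl si acc i = gB cl si i ++ acc := by
  unfold fpgB_step gB
  cases si.getD i none <;> by_cases h : 0 < i <;> simp [h, String.append_assoc]

theorem revfold_eq (cl : List (List String)) (si : List (Option (List String))) :
    ∀ (l : List Nat) (acc : String),
      (l.reverse).foldl (fpgB_step cl si) acc = strJoin (l.map (gB cl si)) ++ acc := by
  intro l
  induction l with
  | nil => intro acc; simp [strJoin]
  | cons a t ih =>
    intro acc
    simp only [List.reverse_cons, List.foldl_append, List.foldl_cons, List.foldl_nil,
      fpgB_step_eq, ih, List.map_cons, strJoin, String.append_assoc]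

-- the suffix of B's blocks from index i ≥ 1 is '\n--\n' followed by A's rendering from i
theorem sep_eq : ("\n--\n" : String) = "\n" ++ ("--" ++ "\n") := rfl

theorem sep_pull (x : String) : "\n--\n" ++ x = "\n" ++ ("--" ++ ("\n" ++ x)) := by
  rw [sep_eq, String.append_assoc, String.append_assoc]

theorem gB_suffix (cl : List (List String)) (si : List (Option (List String))) :
    ∀ (ms : List (List String)) (i : Nat), 0 < i → i + ms.length = cl.length → cl.drop i = ms → ms ≠ [] →
      strJoin ((List.range' i ms.length).map (gB cl si)) =
        "\n--\n" ++ strJoin (fpgA_go si cl.length i ms) := by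
  intro ms
  induction ms with
  | nil => intro i _ _ _ h; exact absurd rfl h
  | cons m ms ih =>
    intro i hi hn hdrop _
    have hm : cl[i]? = some m := by
      have h0 : (cl.drop i)[0]? = cl[i + 0]? := List.getElem?_drop
      rw [hdrop] at h0
      simp at h0
      exact h0.symm
    have hdrop' : cl.drop (i + 1) = ms := by
      have h1 : (cl.drop i).drop 1 = ms := by simp [hdrop]
      simpa [List.drop_drop, Nat.add_comm] using h1
    cases ms with
    | nil =>
      have hnot : ¬ (i + 1 < cl.length) := by simp at hn; omega
      have hr : List.range' i ([m] : List (List String)).length = [i] := rfl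
      rw [hr]
      simp only [List.map_cons, List.map_nil, strJoin, fpgA_go, hnot, if_false, List.append_nil]
      cases h : si[i]?.getD none <;>
        simp [gB, List.getD, hi, h, hm, sep_pull, strJoin_append, strJoin, String.append_assoc]
    | cons m2 ms2 =>
      have hlt : i + 1 < cl.length := by simp at hn; omega
      have ihe := ih (i + 1) (by omega) (by simp at hn ⊢; omega) hdrop' (by simp)
      have hr : List.range' i (m :: m2 :: ms2).length =
          i :: List.range' (i + 1) (m2 :: ms2).length := rfl
      rw [hr]
      simp only [List.map_cons, strJoin]
      rw [ihe]
      simp only [fpgA_go, hlt, if_true]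
      cases h : si[i]?.getD none <;>
        simp [gB, List.getD, hi, h, hm, sep_pull, strJoin_append, strJoin, String.append_assoc]

theorem blocks_eq (cl : List (List String)) (si : List (Option (List String))) :
    strJoin ((List.range cl.length).map (gB cl si)) = strJoin (fpgA_go si cl.length 0 cl) := by
  cases cl with
  | nil => simp [fpgA_go, strJoin]
  | cons m ms =>
    have hrange : List.range (m :: ms).length = 0 :: List.range' 1 ms.length := by
      rw [List.range_eq_range']
      rfl
    rw [hrange]
    simp only [List.map_cons, strJoin]
    cases ms with
    | nil =>
      have hnot : ¬ (0 + 1 < ([m] : List (List String)).length) := by simp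
      simp only [fpgA_go, hnot, if_false, List.append_nil, List.length_nil, List.range',
        List.map_nil, strJoin]
      cases h : si[0]?.getD none <;>
        simp [gB, List.getD, h, strJoin_append, strJoin, String.append_assoc]
    | cons m2 ms2 =>
      have hlt : 0 + 1 < (m :: m2 :: ms2).length := by simp
      have hs := gB_suffix (m :: m2 :: ms2) si (m2 :: ms2) 1 (by omega) (by simp; omega) (by simp) (by simp)
      rw [hs]
      simp only [fpgA_go, hlt, if_true]
      cases h : si[0]?.getD none <;>
        simp [gB, List.getD, h, sep_pull, strJoin_append, strJoin, String.append_assoc]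

-- ===== VERDICT (by name: the statement is the Claim_ definition above) =====
theorem format_psi4_geom_spec : Claim_equal_format_psi4_geom := by
  intro cl si opts _ _
  unfold Spec_format_psi4_geom format_psi4_geom format_psi4_geom_alt
  rw [strJoin_append, revfold_eq, blocks_eq]
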